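-- pv_equiv track=rewrite | github.com/mateozorzi/TDA | RPL_2024/1.Greedy/ej10.py | bifurcaciones_con_patrulla
-- ===== SOURCE A (Python) =====
-- def bifurcaciones_con_patrulla(ciudades):
--     if(len(ciudades) == 0):
--         return []
--     ciudadesOrdenadoPorKm = sorted(ciudades, key=lambda x: x[1])
--
--     cantCiudadesCubiertas = []
--     for ciudad in ciudadesOrdenadoPorKm:
--         aux = []
--         cantCubiertas = 0
--         ciudadesCubiertas = []
--         for otraCiudad in ciudadesOrdenadoPorKm:
--             if(abs(otraCiudad[1] - ciudad[1]) <= 50 and otraCiudad[1] - ciudad[1] != 0):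
--                 cantCubiertas += 1
--                 ciudadesCubiertas.append(otraCiudad)
--         aux.append(ciudad[0])
--         aux.append(ciudad[1])
--         aux.append(cantCubiertas)
--         aux.append(ciudadesCubiertas)
--         cantCiudadesCubiertas.append(aux)
--
--
--     cantCiudadesCubiertas = sorted(cantCiudadesCubiertas, key=lambda x:x[2],reverse=True)
--
--     ciudadesConVigilancia = []
--     ciudadesConCobertura = []
--     for ciudad in cantCiudadesCubiertas:
--         #ciudad = [ciudad[0], ciudad[1]]
--         if((ciudad[0], ciudad[1]) not in ciudadesConVigilancia and (ciudad[0], ciudad[1]) not in ciudadesConCobertura):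
--             ciudadesConVigilancia.append((ciudad[0], ciudad[1]))
--             for ciudadesCubiertas in ciudad[3]:
--                 ciudadesConCobertura.append((ciudadesCubiertas[0], ciudadesCubiertas[1]))
--
--
--     return ciudadesConVigilancia
-- ===== SOURCE B (Python) =====
-- def bifurcaciones_con_patrulla(ciudades):
--     if len(ciudades) == 0:
--         return []
--     orden = sorted(ciudades, key=lambda c: c[1])
--     n = len(orden)
--     freq = {}
--     for c in orden:
--         freq[c[1]] = freq.get(c[1], 0) + 1
--     info = []
--     lo = 0
--     hi = 0
--     for c in orden:
--         while lo < n and orden[lo][1] < c[1] - 50: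
--             lo += 1
--         while hi < n and orden[hi][1] <= c[1] + 50:
--             hi += 1
--         info.append((c[0], c[1], hi - lo - freq[c[1]], lo, hi))
--     info = sorted(info, key=lambda t: t[2], reverse=True)
--     vigilancia = []
--     elegidas = set()
--     cubiertas = set()
--     for nombre, km, cnt, lo, hi in info:
--         if (nombre, km) not in elegidas and (nombre, km) not in cubiertas:
--             vigilancia.append((nombre, km))
--             elegidas.add((nombre, km))
--             for o in orden[lo:hi]:
--                 if o[1] != km:
--                     cubiertas.add((o[0], o[1]))
--     return vigilancia
-- ===== Notes on version B (the rewrite author's own statement) =====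
-- stated objective: faster
-- what changed: Replaces the quadratic all-pairs neighbour scan by a sort plus one two-pointer sweep (window [lo,hi) of cities within 50 km, counts via a km-frequency dict), and replaces the linear list-membership tests of the greedy phase by sets.
import Mathlib
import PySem

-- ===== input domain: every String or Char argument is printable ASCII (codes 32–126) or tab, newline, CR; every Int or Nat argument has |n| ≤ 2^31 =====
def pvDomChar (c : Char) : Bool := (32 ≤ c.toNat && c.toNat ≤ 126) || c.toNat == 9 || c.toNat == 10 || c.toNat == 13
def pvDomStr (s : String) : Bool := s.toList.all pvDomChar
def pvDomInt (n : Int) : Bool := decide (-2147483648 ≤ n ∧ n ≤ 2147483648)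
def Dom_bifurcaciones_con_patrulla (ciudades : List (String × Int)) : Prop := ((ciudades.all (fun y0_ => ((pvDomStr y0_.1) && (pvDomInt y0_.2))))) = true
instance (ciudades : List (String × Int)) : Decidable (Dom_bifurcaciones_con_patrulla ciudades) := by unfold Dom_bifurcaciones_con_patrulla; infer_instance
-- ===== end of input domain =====

-- B replaces A's quadratic all-pairs neighbour scan by one two-pointer sweep over the
-- km-sorted list (window [lo,hi) of the cities within 50 km, same-km counts from a dict)
-- and uses sets instead of list membership in the greedy phase.

-- ===== PORT A =====
def bifurcaciones_con_patrulla (ciudades : List (String × Int)) : List (String × Int) :=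
  if ciudades.length = 0 then [] else
  let ordenado := PySem.List.sorted ciudades (fun x => x.2) false
  let cant := ordenado.foldl (fun acc ciudad =>
    let inner := ordenado.foldl
      (fun (st : Int × List (String × Int)) otra =>
        if |otra.2 - ciudad.2| ≤ 50 ∧ otra.2 - ciudad.2 ≠ 0 then (st.1 + 1, st.2 ++ [otra]) else st)
      (0, [])
    acc ++ [(ciudad.1, ciudad.2, inner.1, inner.2)])
    ([] : List (String × Int × Int × List (String × Int)))
  let cant2 := PySem.List.sorted cant (fun x => x.2.2.1) true
  let res := cant2.foldl
    (fun (st : List (String × Int) × List (String × Int)) ciudad =>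
      if (ciudad.1, ciudad.2.1) ∉ st.1 ∧ (ciudad.1, ciudad.2.1) ∉ st.2 then
        (st.1 ++ [(ciudad.1, ciudad.2.1)],
         ciudad.2.2.2.foldl (fun cob cc => cob ++ [(cc.1, cc.2)]) st.2)
      else st)
    ([], [])
  res.1

-- ===== PORT B =====
-- the two `while` loops of Source B: advance index i while it is in range and p holds
def pvAdvance (orden : List (String × Int)) (p : Int → Bool) (i : Nat) : Nat :=
  if h : i < orden.length then
    if p (orden[i]'h).2 then pvAdvance orden p (i + 1) else i
  else i
termination_by orden.length - i
decreasing_by omega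

def bifurcaciones_con_patrulla_alt (ciudades : List (String × Int)) : List (String × Int) :=
  if ciudades.length = 0 then [] else
  let orden := PySem.List.sorted ciudades (fun c => c.2) false
  let freq := orden.foldl
    (fun d c => PySem.Dict.insert d c.2 (PySem.Dict.getD d c.2 0 + 1))
    (PySem.Dict.empty : PySem.Dict Int Int)
  let sweep := orden.foldl
    (fun (st : List (String × Int × Int × Nat × Nat) × Nat × Nat) c =>
      let lo := pvAdvance orden (fun k => decide (k < c.2 - 50)) st.2.1
      let hi := pvAdvance orden (fun k => decide (k ≤ c.2 + 50)) st.2.2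
      (st.1 ++ [(c.1, c.2, (hi : Int) - (lo : Int) - PySem.Dict.getD freq c.2 0, lo, hi)], lo, hi))
    ([], 0, 0)
  let info := PySem.List.sorted sweep.1 (fun t => t.2.2.1) true
  let res := info.foldl
    (fun (st : List (String × Int) × PySem.Set (String × Int) × PySem.Set (String × Int)) t =>
      if ¬ PySem.Set.contains st.2.1 (t.1, t.2.1) ∧ ¬ PySem.Set.contains st.2.2 (t.1, t.2.1) then
        (st.1 ++ [(t.1, t.2.1)],
         PySem.Set.add st.2.1 (t.1, t.2.1),
         (PySem.List.slice orden (some (t.2.2.2.1 : Int)) (some (t.2.2.2.2 : Int))).foldl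
           (fun s o => if o.2 ≠ t.2.1 then PySem.Set.add s (o.1, o.2) else s) st.2.2)
      else st)
    ([], PySem.Set.empty, PySem.Set.empty)
  res.1

-- ===== PRECONDITION & SPEC =====
def Spec_bifurcaciones_con_patrulla (ciudades : List (String × Int)) (out : List (String × Int)) : Prop := out = bifurcaciones_con_patrulla_alt ciudades
instance (ciudades : List (String × Int)) (out : List (String × Int)) : Decidable (Spec_bifurcaciones_con_patrulla ciudades out) := by unfold Spec_bifurcaciones_con_patrulla; infer_instance

-- ===== CLAIM (what is proved, stated in full; the proofs are below) =====
def Claim_equal_bifurcaciones_con_patrulla : Prop := ∀ (ciudades : List (String × Int)), Dom_bifurcaciones_con_patrulla ciudades → Spec_bifurcaciones_con_patrulla ciudades (bifurcaciones_con_patrulla ciudades)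

-- ===== LEMMAS AND PROOFS =====

theorem pv_prefix_char (p : Int → Bool) (hm : ∀ x y : Int, x ≤ y → p y → p x)
    (L : List (String × Int)) (hs : L.Pairwise (fun a b => a.2 ≤ b.2))
    (j : Nat) (hj : j < L.length) :
    p (L[j]'hj).2 = true ↔ j < L.countP (fun o => p o.2) := by
  induction L generalizing j with
  | nil => simp at hj
  | cons a t ih =>
    rcases List.pairwise_cons.mp hs with ⟨ha, ht⟩
    have hz : p a.2 ≠ true → t.countP (fun o => p o.2) = 0 := by
      intro hpa
      rw [List.countP_eq_zero]
      intro o ho; by_contra hpo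
      exact hpa (hm a.2 o.2 (ha o ho) (by simpa using hpo))
    cases j with
    | zero =>
      simp only [List.getElem_cons_zero, List.countP_cons]
      constructor
      · intro h; simp [h]
      · intro h; by_contra hp
        simp [hp, hz hp] at h
    | succ j =>
      simp only [List.getElem_cons_succ, List.countP_cons]
      rw [ih ht j (by simpa using hj)]
      by_cases hpa : p a.2 = true
      · simp [hpa]
      · simp [hpa, hz hpa]

theorem pvAdvance_eq (L : List (String × Int)) (p : Int → Bool) (t : Nat)
    (h1 : ∀ (j : Nat) (hj : j < L.length), p (L[j]'hj).2 = true ↔ j < t)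
    (ht : t ≤ L.length) (i : Nat) (hi : i ≤ t) : pvAdvance L p i = t := by
  rw [pvAdvance]
  by_cases hlt : i < L.length
  · rw [dif_pos hlt]
    by_cases hit : i < t
    · rw [if_pos ((h1 i hlt).mpr hit)]
      exact pvAdvance_eq L p t h1 ht (i + 1) (by omega)
    · have : i = t := by omega
      subst this
      rw [if_neg (by intro hc; exact absurd ((h1 i hlt).mp hc) (by omega))]
  · rw [dif_neg hlt]; omega
termination_by t - i
decreasing_by omega

def pvPred (k : Int) (o : String × Int) : Bool := decide (|o.2 - k| ≤ 50 ∧ o.2 - k ≠ 0)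
def pvLo (L : List (String × Int)) (k : Int) : Nat := L.countP (fun o => decide (o.2 < k - 50))
def pvHi (L : List (String × Int)) (k : Int) : Nat := L.countP (fun o => decide (o.2 ≤ k + 50))
def pvWin (L : List (String × Int)) (k : Int) : List (String × Int) :=
  (L.drop (pvLo L k)).take (pvHi L k - pvLo L k)

theorem pvLo_le_pvHi (L : List (String × Int)) (k : Int) : pvLo L k ≤ pvHi L k :=
  List.countP_mono_left (fun o _ h => by simp at h ⊢; omega)

theorem pvHi_le_length (L : List (String × Int)) (k : Int) : pvHi L k ≤ L.length :=
  List.countP_le_length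

theorem pv_mem_take (L : List (String × Int)) (hs : L.Pairwise (fun a b => a.2 ≤ b.2))
    (k : Int) (o : String × Int) (ho : o ∈ L.take (pvLo L k)) : o.2 < k - 50 := by
  rcases List.mem_iff_getElem.mp ho with ⟨i, hi, rfl⟩
  have hi' : i < pvLo L k := by simp at hi; omega
  have hil : i < L.length := by
    have := pvHi_le_length L k; have := pvLo_le_pvHi L k; omega
  have := (pv_prefix_char (fun x => decide (x < k - 50)) (fun x y hxy h => by simp at h ⊢; omega)
    L hs i hil).mpr hi'
  simpa [List.getElem_take] using this

theorem pv_mem_drop (L : List (String × Int)) (hs : L.Pairwise (fun a b => a.2 ≤ b.2))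
    (k : Int) (o : String × Int) (ho : o ∈ L.drop (pvHi L k)) : k + 50 < o.2 := by
  rcases List.mem_iff_getElem.mp ho with ⟨i, hi, rfl⟩
  have hil : pvHi L k + i < L.length := by simp at hi; omega
  have hnot := (pv_prefix_char (fun x => decide (x ≤ k + 50)) (fun x y hxy h => by simp at h ⊢; omega)
    L hs (pvHi L k + i) hil)
  simp only [List.getElem_drop]
  by_contra hc
  have : pvHi L k + i < pvHi L k := hnot.mp (by simp; omega)
  omega

theorem pv_mem_win (L : List (String × Int)) (hs : L.Pairwise (fun a b => a.2 ≤ b.2))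
    (k : Int) (o : String × Int) (ho : o ∈ pvWin L k) : k - 50 ≤ o.2 ∧ o.2 ≤ k + 50 := by
  rcases List.mem_iff_getElem.mp ho with ⟨i, hi, rfl⟩
  unfold pvWin at hi ⊢
  have hlen : (L.drop (pvLo L k)).length = L.length - pvLo L k := by simp
  have hil : pvLo L k + i < L.length := by simp at hi; omega
  have hiwin : pvLo L k + i < pvHi L k := by simp at hi; omega
  have h1 := (pv_prefix_char (fun x => decide (x < k - 50)) (fun x y hxy h => by simp at h ⊢; omega)
    L hs (pvLo L k + i) hil)
  have h2 := (pv_prefix_char (fun x => decide (x ≤ k + 50)) (fun x y hxy h => by simp at h ⊢; omega)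
    L hs (pvLo L k + i) hil)
  simp only [List.getElem_take, List.getElem_drop]
  have e1 : List.countP (fun o => decide (o.2 < k - 50)) L = pvLo L k := rfl
  have e2 : List.countP (fun o => decide (o.2 ≤ k + 50)) L = pvHi L k := rfl
  rw [e1] at h1; rw [e2] at h2
  constructor
  · by_contra hc
    have := h1.mp (by simp; omega)
    omega
  · have := h2.mpr hiwin
    simpa using this

theorem pv_decomp (L : List (String × Int)) (k : Int) :
    L = L.take (pvLo L k) ++ (pvWin L k ++ L.drop (pvHi L k)) := by
  have h1 := pvLo_le_pvHi L k
  conv_lhs => rw [← List.take_append_drop (pvLo L k) L]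
  congr 1
  unfold pvWin
  conv_lhs => rw [← List.take_append_drop (pvHi L k - pvLo L k) (L.drop (pvLo L k))]
  congr 1
  rw [List.drop_drop]
  congr 1
  omega

theorem pv_cov_eq (L : List (String × Int)) (hs : L.Pairwise (fun a b => a.2 ≤ b.2)) (k : Int) :
    L.filter (pvPred k) = (pvWin L k).filter (fun o => decide (o.2 ≠ k)) := by
  conv_lhs => rw [pv_decomp L k]
  rw [List.filter_append, List.filter_append]
  have h1 : (L.take (pvLo L k)).filter (pvPred k) = [] := by
    rw [List.filter_eq_nil_iff]
    intro o ho
    have := pv_mem_take L hs k o ho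
    simp [pvPred, abs_le]; omega
  have h2 : (L.drop (pvHi L k)).filter (pvPred k) = [] := by
    rw [List.filter_eq_nil_iff]
    intro o ho
    have := pv_mem_drop L hs k o ho
    simp [pvPred, abs_le]; omega
  have h3 : (pvWin L k).filter (pvPred k) = (pvWin L k).filter (fun o => decide (o.2 ≠ k)) := by
    apply List.filter_congr
    intro o ho
    have := pv_mem_win L hs k o ho
    unfold pvPred
    simp only [decide_eq_decide, abs_le]
    constructor
    · intro hh; omega
    · intro hh; omega
  rw [h1, h2, h3]; simp

theorem pv_cnt (L : List (String × Int)) (hs : L.Pairwise (fun a b => a.2 ≤ b.2)) (k : Int) :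
    (L.countP (pvPred k) : Int) = (pvHi L k : Int) - (pvLo L k : Int) - ((L.map (fun o => o.2)).count k : Int) := by
  have hwl : (pvWin L k).length = pvHi L k - pvLo L k := by
    unfold pvWin
    have := pvLo_le_pvHi L k
    have := pvHi_le_length L k
    simp; omega
  have hc1 : L.countP (pvPred k) = (pvWin L k).countP (fun o => decide (o.2 ≠ k)) := by
    rw [List.countP_eq_length_filter, List.countP_eq_length_filter, pv_cov_eq L hs k]
  have hc2 : (L.map (fun o => o.2)).count k = (pvWin L k).countP (fun o => decide (o.2 = k)) := by
    rw [List.count_eq_countP, List.countP_map]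
    conv_lhs => rw [pv_decomp L k]
    rw [List.countP_append, List.countP_append]
    have h1 : (L.take (pvLo L k)).countP ((fun x => x == k) ∘ fun o => o.2) = 0 := by
      rw [List.countP_eq_zero]
      intro o ho
      have := pv_mem_take L hs k o ho
      simp; omega
    have h2 : (L.drop (pvHi L k)).countP ((fun x => x == k) ∘ fun o => o.2) = 0 := by
      rw [List.countP_eq_zero]
      intro o ho
      have := pv_mem_drop L hs k o ho
      simp; omega
    rw [h1, h2]
    simp only [Nat.zero_add, Nat.add_zero]
    apply List.countP_congr
    intro o ho
    simp
  have hc3 : (pvWin L k).countP (fun o => decide (o.2 ≠ k)) + (pvWin L k).countP (fun o => decide (o.2 = k)) = (pvWin L k).length := by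
    have hgen : ∀ (l : List (String × Int)) (p : (String × Int) → Bool),
        l.countP (fun o => !p o) + l.countP p = l.length := by
      intro l p
      induction l with
      | nil => simp
      | cons a t ih =>
        simp only [List.countP_cons, List.length_cons]
        by_cases ha : p a = true <;> simp [ha] <;> omega
    have := hgen (pvWin L k) (fun o => decide (o.2 = k))
    simpa using this
  rw [hc1, hc2]
  have := pvLo_le_pvHi L k
  omega

-- the freq dict of B is a counter of the km values
theorem pv_freq (xs : List (String × Int)) (k : Int) :
    (xs.foldl (fun d c => PySem.Dict.insert d c.2 (PySem.Dict.getD d c.2 0 + 1))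
      (PySem.Dict.empty : PySem.Dict Int Int)).getD k 0 = ((xs.map (fun o => o.2)).count k : Int) := by
  suffices h : ∀ (d : PySem.Dict Int Int),
      (xs.foldl (fun d c => PySem.Dict.insert d c.2 (PySem.Dict.getD d c.2 0 + 1)) d).getD k 0
        = d.getD k 0 + ((xs.map (fun o => o.2)).count k : Int) by
    simpa using h PySem.Dict.empty
  induction xs with
  | nil => simp
  | cons x t ih =>
    intro d
    simp only [List.foldl_cons, ih, List.map_cons, List.count_cons]
    by_cases hx : k = x.2
    · subst hx
      rw [PySem.Dict.getD_insert]
      simp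
      ring
    · rw [PySem.Dict.getD_insert]
      rw [if_neg hx]
      have : (x.2 == k) = false := by simp; exact fun h => hx h.symm
      simp [this]

-- A's inner loop accumulates the count and the filtered list
theorem pv_inner (M : List (String × Int)) (k : Int) (a : Int) (bs : List (String × Int)) :
    M.foldl (fun (st : Int × List (String × Int)) otra =>
        if |otra.2 - k| ≤ 50 ∧ otra.2 - k ≠ 0 then (st.1 + 1, st.2 ++ [otra]) else st) (a, bs)
      = (a + (M.countP (pvPred k) : Int), bs ++ M.filter (pvPred k)) := by
  induction M generalizing a bs with
  | nil => simp
  | cons x t ih =>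
    simp only [List.foldl_cons, List.countP_cons, List.filter_cons]
    by_cases hx : |x.2 - k| ≤ 50 ∧ x.2 - k ≠ 0
    · rw [if_pos hx]
      have hp : pvPred k x = true := by simp [pvPred]; tauto
      rw [ih]
      simp [hp]
      ring
    · rw [if_neg hx]
      have hp : pvPred k x = false := by simp [pvPred]; tauto
      rw [ih]
      simp [hp]

theorem pvLo_mono (L : List (String × Int)) (k k' : Int) (h : k ≤ k') : pvLo L k ≤ pvLo L k' :=
  List.countP_mono_left (fun o _ ho => by simp at ho ⊢; omega)

theorem pvHi_mono (L : List (String × Int)) (k k' : Int) (h : k ≤ k') : pvHi L k ≤ pvHi L k' :=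
  List.countP_mono_left (fun o _ ho => by simp at ho ⊢; omega)

theorem pvAdvance_lo (L : List (String × Int)) (hs : L.Pairwise (fun a b => a.2 ≤ b.2))
    (k : Int) (i : Nat) (hi : i ≤ pvLo L k) :
    pvAdvance L (fun x => decide (x < k - 50)) i = pvLo L k := by
  apply pvAdvance_eq
  · intro j hj
    exact pv_prefix_char (fun x => decide (x < k - 50)) (fun x y hxy h => by simp at h ⊢; omega) L hs j hj
  · exact le_trans (pvLo_le_pvHi L k) (pvHi_le_length L k)
  · exact hi

theorem pvAdvance_hi (L : List (String × Int)) (hs : L.Pairwise (fun a b => a.2 ≤ b.2))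
    (k : Int) (i : Nat) (hi : i ≤ pvHi L k) :
    pvAdvance L (fun x => decide (x ≤ k + 50)) i = pvHi L k := by
  apply pvAdvance_eq
  · intro j hj
    exact pv_prefix_char (fun x => decide (x ≤ k + 50)) (fun x y hxy h => by simp at h ⊢; omega) L hs j hj
  · exact pvHi_le_length L k
  · exact hi

-- B's sweep fold produces the window data of every city
theorem pv_sweep (L : List (String × Int)) (hs : L.Pairwise (fun a b => a.2 ≤ b.2))
    (q : Int → Int) (M : List (String × Int)) (acc : List (String × Int × Int × Nat × Nat))
    (lo hi : Nat)
    (hM : ∀ c ∈ M, lo ≤ pvLo L c.2 ∧ hi ≤ pvHi L c.2)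
    (hMp : M.Pairwise (fun a b => a.2 ≤ b.2)) :
    (M.foldl (fun (st : List (String × Int × Int × Nat × Nat) × Nat × Nat) c =>
      let lo := pvAdvance L (fun x => decide (x < c.2 - 50)) st.2.1
      let hi := pvAdvance L (fun x => decide (x ≤ c.2 + 50)) st.2.2
      (st.1 ++ [(c.1, c.2, (hi : Int) - (lo : Int) - q c.2, lo, hi)], lo, hi)) (acc, lo, hi)).1
    = acc ++ M.map (fun c => (c.1, c.2, (pvHi L c.2 : Int) - (pvLo L c.2 : Int) - q c.2, pvLo L c.2, pvHi L c.2)) := by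
  induction M generalizing acc lo hi with
  | nil => simp
  | cons c t ih =>
    rcases List.pairwise_cons.mp hMp with ⟨hc, ht⟩
    simp only [List.foldl_cons]
    rw [pvAdvance_lo L hs c.2 lo (hM c (by simp)).1, pvAdvance_hi L hs c.2 hi (hM c (by simp)).2]
    rw [ih _ (pvLo L c.2) (pvHi L c.2) ?_ ht]
    · simp
    · intro c' hc'
      exact ⟨pvLo_mono L c.2 c'.2 (hc c' hc'), pvHi_mono L c.2 c'.2 (hc c' hc')⟩

theorem pv_insertBy_map {α β : Type} (f : α → β) (b : β → β → Bool) (x : α) (ys : List α) :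
    PySem.List.insertBy b (f x) (ys.map f) = (PySem.List.insertBy (fun a c => b (f a) (f c)) x ys).map f := by
  induction ys with
  | nil => simp [PySem.List.insertBy]
  | cons y t ih =>
    simp only [List.map_cons, PySem.List.insertBy]
    by_cases hb : b (f x) (f y) = true
    · simp [hb]
    · simp [hb, ih]

theorem pv_sorted_rev_map {α β κ : Type} [LT κ] [DecidableLT κ] (f : α → β) (key : β → κ) (L : List α) :
    PySem.List.sorted (L.map f) key true = (PySem.List.sorted L (fun a => key (f a)) true).map f := by
  rw [PySem.List.sorted_rev_eq_foldl_insertBy, PySem.List.sorted_rev_eq_foldl_insertBy]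
  rw [List.foldl_map]
  suffices h : ∀ (acc : List α),
      L.foldl (fun acc x => PySem.List.insertBy (fun a c => decide (key c < key a)) (f x) acc) (acc.map f)
        = (L.foldl (fun acc x => PySem.List.insertBy (fun a c => decide (key (f c) < key (f a))) x acc) acc).map f by
    simpa using h []
  induction L with
  | nil => simp
  | cons x t ih =>
    intro acc
    simp only [List.foldl_cons]
    rw [pv_insertBy_map f (fun a c => decide (key c < key a)) x acc]
    exact ih _

theorem pv_fold_add_mem (k : Int) (M : List (String × Int)) (s0 : PySem.Set (String × Int))
    (x : String × Int) :
    (x ∈ M.foldl (fun s o => if o.2 ≠ k then PySem.Set.add s (o.1, o.2) else s) s0)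
      ↔ x ∈ s0 ∨ x ∈ M.filter (fun o => decide (o.2 ≠ k)) := by
  induction M generalizing s0 with
  | nil => simp
  | cons o t ih =>
    simp only [List.foldl_cons, List.filter_cons]
    by_cases ho : o.2 ≠ k
    · rw [if_pos ho, if_pos (by simpa using ho)]
      rw [ih]
      simp [PySem.Set.mem_add]
      tauto
    · rw [if_neg ho, if_neg (by simpa using ho)]
      exact ih s0

theorem pv_foldl_pairs (cov : List (String × Int)) (cob : List (String × Int)) :
    cov.foldl (fun cob cc => cob ++ [(cc.1, cc.2)]) cob = cob ++ cov := by
  induction cov generalizing cob with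
  | nil => simp
  | cons c t ih => simp [ih]

theorem pv_greedy (L : List (String × Int)) (hs : L.Pairwise (fun a b => a.2 ≤ b.2))
    (S : List (String × Int)) (vig cob : List (String × Int))
    (eset cset : PySem.Set (String × Int))
    (hv : ∀ x, x ∈ eset ↔ x ∈ vig) (hc : ∀ x, x ∈ cset ↔ x ∈ cob) :
    (S.foldl (fun (st : List (String × Int) × List (String × Int)) c =>
        if (c.1, c.2) ∉ st.1 ∧ (c.1, c.2) ∉ st.2 then
          (st.1 ++ [(c.1, c.2)],
           (L.filter (pvPred c.2)).foldl (fun cob cc => cob ++ [(cc.1, cc.2)]) st.2)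
        else st) (vig, cob)).1
    = (S.foldl (fun (st : List (String × Int) × PySem.Set (String × Int) × PySem.Set (String × Int)) c =>
        if ¬ PySem.Set.contains st.2.1 (c.1, c.2) ∧ ¬ PySem.Set.contains st.2.2 (c.1, c.2) then
          (st.1 ++ [(c.1, c.2)],
           PySem.Set.add st.2.1 (c.1, c.2),
           (pvWin L c.2).foldl (fun s o => if o.2 ≠ c.2 then PySem.Set.add s (o.1, o.2) else s) st.2.2)
        else st) (vig, eset, cset)).1 := by
  induction S generalizing vig cob eset cset with
  | nil => simp
  | cons c t ih =>
    simp only [List.foldl_cons]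
    have hcond : ((c.1, c.2) ∉ vig ∧ (c.1, c.2) ∉ cob)
        ↔ (¬ PySem.Set.contains eset (c.1, c.2) ∧ ¬ PySem.Set.contains cset (c.1, c.2)) := by
      simp [PySem.Set.contains, hv, hc]
    by_cases h : (c.1, c.2) ∉ vig ∧ (c.1, c.2) ∉ cob
    · rw [if_pos h, if_pos (hcond.mp h)]
      apply ih
      · intro x
        rw [PySem.Set.mem_add]
        simp [hv]
      · intro x
        rw [pv_fold_add_mem, pv_foldl_pairs, pv_cov_eq L hs c.2]
        simp [hc]
    · rw [if_neg h, if_neg (fun hh => h (hcond.mpr hh))]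
      exact ih vig cob eset cset hv hc

theorem pv_main (ciudades : List (String × Int)) :
    bifurcaciones_con_patrulla ciudades = bifurcaciones_con_patrulla_alt ciudades := by
  unfold bifurcaciones_con_patrulla bifurcaciones_con_patrulla_alt
  by_cases hlen : ciudades.length = 0
  · simp [hlen]
  · rw [if_neg hlen, if_neg hlen]
    dsimp only
    set L := PySem.List.sorted ciudades (fun x => x.2) false with hL
    have hs : L.Pairwise (fun a b => a.2 ≤ b.2) :=
      PySem.List.sorted_pairwise ciudades (fun x => x.2)
    -- A's count table is a map over L
    have hA : (L.foldl (fun acc ciudad =>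
        let inner := L.foldl
          (fun (st : Int × List (String × Int)) otra =>
            if |otra.2 - ciudad.2| ≤ 50 ∧ otra.2 - ciudad.2 ≠ 0 then (st.1 + 1, st.2 ++ [otra]) else st)
          (0, [])
        acc ++ [(ciudad.1, ciudad.2, inner.1, inner.2)])
        ([] : List (String × Int × Int × List (String × Int))))
        = L.map (fun c => (c.1, c.2, (L.countP (pvPred c.2) : Int), L.filter (pvPred c.2))) := by
      simp only [pv_inner]
      rw [PySem.List.foldl_append_singleton_eq_map]
      simp
    -- B's sweep table is a map over L
    have hB : (L.foldl
        (fun (st : List (String × Int × Int × Nat × Nat) × Nat × Nat) c =>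
          let lo := pvAdvance L (fun k => decide (k < c.2 - 50)) st.2.1
          let hi := pvAdvance L (fun k => decide (k ≤ c.2 + 50)) st.2.2
          (st.1 ++ [(c.1, c.2, (hi : Int) - (lo : Int) -
            PySem.Dict.getD (L.foldl (fun d c => PySem.Dict.insert d c.2 (PySem.Dict.getD d c.2 0 + 1))
              (PySem.Dict.empty : PySem.Dict Int Int)) c.2 0, lo, hi)], lo, hi))
        ([], 0, 0)).1
        = L.map (fun c => (c.1, c.2, (L.countP (pvPred c.2) : Int), pvLo L c.2, pvHi L c.2)) := by
      rw [pv_sweep L hs (fun k => PySem.Dict.getD (L.foldl (fun d c => PySem.Dict.insert d c.2 (PySem.Dict.getD d c.2 0 + 1))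
              (PySem.Dict.empty : PySem.Dict Int Int)) k 0) L [] 0 0 (fun c _ => ⟨Nat.zero_le _, Nat.zero_le _⟩) hs]
      simp only [List.nil_append]
      apply List.map_congr_left
      intro c _
      rw [pv_freq L c.2, ← pv_cnt L hs c.2]
    rw [hA, hB]
    -- both sort keys are the count
    rw [pv_sorted_rev_map (fun c => (c.1, c.2, (L.countP (pvPred c.2) : Int), L.filter (pvPred c.2)))
          (fun x => x.2.2.1) L,
        pv_sorted_rev_map (fun c => (c.1, c.2, (L.countP (pvPred c.2) : Int), pvLo L c.2, pvHi L c.2))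
          (fun t => t.2.2.1) L]
    set S := PySem.List.sorted L (fun a => ((L.countP (pvPred a.2) : Int))) true with hS
    rw [List.foldl_map, List.foldl_map]
    simp only []
    -- greedy phases agree
    simp only [PySem.List.slice_natCast]
    have hg := pv_greedy L hs S [] [] PySem.Set.empty PySem.Set.empty
      (fun x => by simp [PySem.Set.empty]) (fun x => by simp [PySem.Set.empty])
    simp only [pvWin] at hg
    exact hg

-- ===== VERDICT (by name: the statement is the Claim_ definition above) =====
theorem bifurcaciones_con_patrulla_spec : Claim_equal_bifurcaciones_con_patrulla := by
  intro ciudades _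
  unfold Spec_bifurcaciones_con_patrulla
  exact pv_main ciudades
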